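-- pv_equiv track=rewrite | github.com/ZyzzGit/AoC-24 | Day9/puzzle9_part2.py | to_filesystem
-- ===== SOURCE A (Python) =====
-- def to_filesystem(disk_map):
--     files = []
--     spaces = []
--     disk_index = 0
--     for i, k in enumerate(disk_map):
--         disk_range = (disk_index, disk_index + k)
--         if i % 2 == 0:  # all even positions in map correspond to files
--             file_ID = i//2
--             files.append((file_ID, disk_range))
--         elif k > 0:     # odd correspond to spaces, and we only keep positive (existing) ones
--             spaces.append(disk_range)
--         disk_index += k
--     return (files, spaces)
-- ===== SOURCE B (Python) =====
-- def to_filesystem(disk_map):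
--     # Two-at-a-time walk: each step consumes one file entry and (if present)
--     # the following space entry, so no enumerate/parity test is needed.
--     files = []
--     spaces = []
--     rest = disk_map
--     fid = 0
--     pos = 0
--     while rest:
--         f = rest[0]
--         files.append((fid, (pos, pos + f)))
--         pos += f
--         if len(rest) > 1:
--             s = rest[1]
--             if s > 0:
--                 spaces.append((pos, pos + s))
--             pos += s
--         rest = rest[2:]
--         fid += 1
--     return (files, spaces)
-- ===== Notes on version B (the rewrite author's own statement) =====
-- stated objective: alternative
-- what changed: Replaces the enumerate-with-parity-test single loop by a two-at-a-time walk that consumes a file entry and its following space entry per step, keeping an explicit file-id counter instead of computing i//2.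
import Mathlib
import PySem

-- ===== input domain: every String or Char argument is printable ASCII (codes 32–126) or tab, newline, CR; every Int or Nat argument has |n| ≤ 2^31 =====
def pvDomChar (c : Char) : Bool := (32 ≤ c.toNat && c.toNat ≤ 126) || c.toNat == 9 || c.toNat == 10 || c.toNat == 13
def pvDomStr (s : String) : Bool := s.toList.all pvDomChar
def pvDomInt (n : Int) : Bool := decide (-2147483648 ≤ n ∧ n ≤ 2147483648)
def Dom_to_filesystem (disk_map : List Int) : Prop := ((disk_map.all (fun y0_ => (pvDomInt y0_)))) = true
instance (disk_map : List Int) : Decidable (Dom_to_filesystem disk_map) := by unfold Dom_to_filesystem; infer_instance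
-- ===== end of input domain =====

-- B replaces A's enumerate-with-parity-test loop by a two-at-a-time walk with an explicit file-id counter (alternative decomposition, same cost).


-- ===== PORT A =====
-- the loop body of A: state = (files, spaces, disk_index), item = (i, k)
def pvStepA (st : List (Int × Int × Int) × List (Int × Int) × Int) (ik : Int × Int) :
    List (Int × Int × Int) × List (Int × Int) × Int :=
  let i := ik.1
  let k := ik.2
  let dr := (st.2.2, st.2.2 + k)
  if i % 2 == 0 then
    (st.1 ++ [(PySem.Int.floordiv i 2, dr)], st.2.1, st.2.2 + k)
  else if k > 0 then
    (st.1, st.2.1 ++ [dr], st.2.2 + k)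
  else
    (st.1, st.2.1, st.2.2 + k)

def to_filesystem (disk_map : List Int) : (List (Int × (Int × Int))) × (List (Int × Int)) :=
  let st := (PySem.List.enumerate disk_map 0).foldl pvStepA ([], [], 0)
  (st.1, st.2.1)

-- ===== PORT B =====
-- B's while loop: consumes one file entry and (if present) one space entry per step
def pvGoB (files : List (Int × Int × Int)) (spaces : List (Int × Int)) (fid pos : Int) :
    List Int → (List (Int × Int × Int)) × (List (Int × Int))
  | [] => (files, spaces)
  | [f] => (files ++ [(fid, (pos, pos + f))], spaces)
  | f :: s :: rest =>
      pvGoB (files ++ [(fid, (pos, pos + f))])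
            (if s > 0 then spaces ++ [(pos + f, pos + f + s)] else spaces)
            (fid + 1) (pos + f + s) rest

def to_filesystem_alt (disk_map : List Int) : (List (Int × (Int × Int))) × (List (Int × Int)) :=
  pvGoB [] [] 0 0 disk_map

-- ===== PRECONDITION & SPEC =====
def Spec_to_filesystem (disk_map : List Int) (out : (List (Int × (Int × Int))) × (List (Int × Int))) : Prop := out = to_filesystem_alt disk_map
instance (disk_map : List Int) (out : (List (Int × (Int × Int))) × (List (Int × Int))) : Decidable (Spec_to_filesystem disk_map out) := by unfold Spec_to_filesystem; infer_instance

-- ===== CLAIM (what is proved, stated in full; the proofs are below) =====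
def Claim_equal_to_filesystem : Prop := ∀ (disk_map : List Int), Dom_to_filesystem disk_map → Spec_to_filesystem disk_map (to_filesystem disk_map)

-- ===== LEMMAS AND PROOFS =====

lemma pvStepA_even (st : List (Int × Int × Int) × List (Int × Int) × Int) (m : Nat) (k : Int) :
    pvStepA st (2 * (m : Int), k) =
      (st.1 ++ [((m : Int), (st.2.2, st.2.2 + k))], st.2.1, st.2.2 + k) := by
  simp [pvStepA]

lemma pvStepA_odd (st : List (Int × Int × Int) × List (Int × Int) × Int) (m : Nat) (k : Int) :
    pvStepA st (2 * (m : Int) + 1, k) =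
      (if k > 0 then (st.1, st.2.1 ++ [(st.2.2, st.2.2 + k)], st.2.2 + k)
       else (st.1, st.2.1, st.2.2 + k)) := by
  have h1 : ((2 * (m : Int) + 1) % 2 == 0) = false := by
    simp
  simp only [pvStepA, h1, Bool.false_eq_true, if_false]

theorem pvPairInd {P : List Int → Prop} (h0 : P []) (h1 : ∀ f, P [f])
    (h2 : ∀ f s rest, P rest → P (f :: s :: rest)) : ∀ l, P l
  | [] => h0
  | [f] => h1 f
  | f :: s :: rest => h2 f s rest (pvPairInd h0 h1 h2 rest)

lemma pvFold_eq_goB (l : List Int) : ∀ (m : Nat) (fs : List (Int × Int × Int))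
    (sp : List (Int × Int)) (pos : Int),
    (let st := (PySem.List.enumerate l (2 * (m : Int))).foldl pvStepA (fs, sp, pos)
     ((st.1, st.2.1) : (List (Int × (Int × Int))) × (List (Int × Int))))
      = pvGoB fs sp (m : Int) pos l := by
  induction l using pvPairInd with
  | h0 => intro m fs sp pos; simp [PySem.List.enumerate_nil, pvGoB]
  | h1 f =>
      intro m fs sp pos
      simp only [PySem.List.enumerate_cons, PySem.List.enumerate_nil, List.foldl_cons,
        List.foldl_nil, pvGoB, pvStepA_even]
  | h2 f s rest ih =>
      intro m fs sp pos
      have e1 : (2 : Int) * (m : Int) + 1 + 1 = 2 * ((m + 1 : Nat) : Int) := by push_cast; ring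
      simp only [PySem.List.enumerate_cons, List.foldl_cons, pvStepA_even, pvStepA_odd, pvGoB]
      rw [e1]
      by_cases hs : s > 0
      case neg =>
        simp only [if_neg hs]
        have := ih (m + 1) (fs ++ [((m : Int), (pos, pos + f))]) sp (pos + f + s)
        push_cast at this ⊢
        simpa [add_assoc] using this
      case pos =>
        simp only [if_pos hs]
        have := ih (m + 1) (fs ++ [((m : Int), (pos, pos + f))])
          (sp ++ [(pos + f, pos + f + s)]) (pos + f + s)
        push_cast at this ⊢
        simpa [add_assoc] using this

-- ===== VERDICT (by name: the statement is the Claim_ definition above) =====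
theorem to_filesystem_spec : Claim_equal_to_filesystem := by
  intro disk_map _
  unfold Spec_to_filesystem to_filesystem to_filesystem_alt
  have := pvFold_eq_goB disk_map 0 [] [] 0
  simpa using this
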